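-- pv_equiv track=rewrite | github.com/Alina85275/Course_Python | 5_Lesson/Task5_2.py | range_nums
-- ===== SOURCE A (Python) =====
-- def range_nums(new_list: list):
--     my_list = []
--     for i in range(len(new_list)):
--         f = new_list[i]
--         lis = [f]
--         for x in range(i+1, len(new_list)):
--             if new_list[x] >f:
--                 f = new_list[x]
--                 lis.append(f)
--         if len(lis) > 1:
--             my_list.append(lis)
--     return my_list
-- ===== SOURCE B (Python) =====
-- def range_nums(new_list: list):
--     # Backward pass: build the record-chain of every suffix once, reusing
--     # (sharing) the already-built chains of later suffixes instead of
--     # re-scanning with a running max for every start index.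
--     rev_chains = []  # chain starting at each processed position, most recent last
--     for v in reversed(new_list):
--         nxt = next((c for c in reversed(rev_chains) if c[0] > v), None)
--         rev_chains.append(([v] + nxt) if nxt is not None else [v])
--     return [c for c in reversed(rev_chains) if len(c) > 1]
-- ===== Notes on version B (the rewrite author's own statement) =====
-- stated objective: alternative
-- what changed: Replaces the nested forward index loops with a running max by a single backward pass that builds the record-chain of every suffix once, each new chain formed by consing the element onto the first already-built chain with a greater head (shared tails), then filtering chains of length > 1.
import Mathlib
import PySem

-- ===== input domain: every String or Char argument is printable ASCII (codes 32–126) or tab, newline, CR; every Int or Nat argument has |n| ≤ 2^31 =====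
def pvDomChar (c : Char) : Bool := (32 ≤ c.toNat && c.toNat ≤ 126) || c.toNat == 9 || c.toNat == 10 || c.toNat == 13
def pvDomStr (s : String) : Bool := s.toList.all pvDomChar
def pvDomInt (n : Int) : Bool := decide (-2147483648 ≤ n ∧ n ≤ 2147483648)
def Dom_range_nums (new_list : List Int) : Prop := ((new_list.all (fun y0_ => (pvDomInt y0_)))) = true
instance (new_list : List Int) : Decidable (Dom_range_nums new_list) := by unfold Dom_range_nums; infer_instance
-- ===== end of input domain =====

-- B replaces A's nested forward index loops (running max per start index) by one backward
-- pass that builds the record-chain of every suffix once, sharing tails; same results, alternative algorithm.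


-- ===== PORT A =====
-- the body of A's outer loop: f = new_list[i]; lis = [f]; inner loop over x in range(i+1, len);
-- returns the pair (f, lis) after the inner loop (indices are always in range, so pyGetD is exact)
def innerA (l : List Int) (i : Int) : Int × List Int :=
  let f := PySem.List.pyGetD l i 0
  (PySem.List.pyRange (i + 1) (l.length : Int) 1).foldl
    (fun (st : Int × List Int) x =>
      let v := PySem.List.pyGetD l x 0
      if st.1 < v then (v, st.2 ++ [v]) else st)
    (f, [f])

def range_nums (new_list : List Int) : List (List Int) :=
  (PySem.List.pyRange 0 (new_list.length : Int) 1).foldl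
    (fun my_list i =>
      let st := innerA new_list i
      if 1 < st.2.length then my_list ++ [st.2] else my_list)
    []

-- ===== PORT B =====
-- for v in reversed(new_list): cons v onto the first already-built chain with head > v
-- (chains are nonempty by construction, so c[0] is ported as c.headD 0)
def range_nums_alt (new_list : List Int) : List (List Int) :=
  let rev_chains := new_list.foldr
    (fun v cs =>
      cs ++ [match cs.reverse.find? (fun c => decide (v < c.headD 0)) with
             | some c => v :: c
             | none => [v]])
    []
  rev_chains.reverse.filter (fun c => decide (1 < c.length))

-- ===== PRECONDITION & SPEC =====
def Spec_range_nums (new_list : List Int) (out : List (List Int)) : Prop := out = range_nums_alt new_list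
instance (new_list : List Int) (out : List (List Int)) : Decidable (Spec_range_nums new_list out) := by unfold Spec_range_nums; infer_instance

-- ===== CLAIM (what is proved, stated in full; the proofs are below) =====
def Claim_equal_range_nums : Prop := ∀ (new_list : List Int), Dom_range_nums new_list → Spec_range_nums new_list (range_nums new_list)

-- ===== LEMMAS AND PROOFS =====

-- the record chain starting at value f over a suffix
def chainSpec (f : Int) : List Int → List Int
  | [] => [f]
  | x :: r => if f < x then f :: chainSpec x r else chainSpec f r

-- the records strictly after the start (tail of chainSpec)
def tailSpec (f : Int) : List Int → List Int
  | [] => []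
  | x :: r => if f < x then x :: tailSpec x r else tailSpec f r

-- the running max after A's inner loop
def lastRec (f : Int) : List Int → Int
  | [] => f
  | x :: r => if f < x then lastRec x r else lastRec f r

-- the chains of all suffixes, in position order
def suffChains : List Int → List (List Int)
  | [] => []
  | v :: r => chainSpec v r :: suffChains r

theorem chainSpec_eq_cons : ∀ (xs : List Int) (f : Int), chainSpec f xs = f :: tailSpec f xs := by
  intro xs
  induction xs with
  | nil => intro f; rfl
  | cons x r ih =>
    intro f
    by_cases h : f < x <;> simp [chainSpec, tailSpec, h, ih]

theorem chainSpec_head? (xs : List Int) (f : Int) : (chainSpec f xs).head? = some f := by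
  rw [chainSpec_eq_cons]; rfl

theorem inner_fold_eq : ∀ (xs : List Int) (f : Int) (acc : List Int),
    xs.foldl (fun (st : Int × List Int) v => if st.1 < v then (v, st.2 ++ [v]) else st) (f, acc)
      = (lastRec f xs, acc ++ tailSpec f xs) := by
  intro xs
  induction xs with
  | nil => intro f acc; simp [lastRec, tailSpec]
  | cons x r ih =>
    intro f acc
    by_cases h : f < x <;> simp [lastRec, tailSpec, h, ih]

theorem innerA_eq (l : List Int) (k : Nat) :
    innerA l ((k : Int)) = (lastRec (l.getD k 0) (l.drop (k + 1)), chainSpec (l.getD k 0) (l.drop (k + 1))) := by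
  rw [innerA]
  have ha : ((k : Int) + 1) = (((k + 1 : Nat)) : Int) := by push_cast; ring
  rw [PySem.List.pyGetD_natCast, ha]
  rw [PySem.List.foldl_pyRange_pyGetD' l 0
      (f := fun (st : Int × List Int) v => if st.1 < v then (v, st.2 ++ [v]) else st)
      (init := (l.getD k 0, [l.getD k 0])) (by positivity)]
  have : (((k + 1 : Nat) : Int)).toNat = k + 1 := by simp
  rw [this, inner_fold_eq, chainSpec_eq_cons]
  simp

theorem map_range_chain : ∀ (l : List Int),
    (List.range l.length).map (fun k => chainSpec (l.getD k 0) (l.drop (k + 1))) = suffChains l := by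
  intro l
  induction l with
  | nil => rfl
  | cons x r ih =>
    show (List.range (r.length + 1)).map _ = _
    rw [List.range_succ_eq_map]
    simp only [List.map_cons, List.map_map]
    rw [suffChains]
    congr 1

theorem find_suffChains (v : Int) : ∀ (r : List Int),
    (match (suffChains r).find? (fun c => decide (v < c.headD 0)) with
     | some c => v :: c
     | none => [v]) = chainSpec v r := by
  intro r
  induction r with
  | nil => rfl
  | cons x r' ih =>
    simp only [List.headD_eq_head?] at ih ⊢
    by_cases h : v < x
    · simp [suffChains, chainSpec_head?, h, chainSpec]
    · simp [suffChains, chainSpec_head?, h, chainSpec, ih]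

theorem foldr_rev_chains : ∀ (l : List Int),
    l.foldr
      (fun v cs =>
        cs ++ [match cs.reverse.find? (fun c => decide (v < c.headD 0)) with
               | some c => v :: c
               | none => [v]])
      [] = (suffChains l).reverse := by
  intro l
  induction l with
  | nil => rfl
  | cons v r ih =>
    simp only [List.foldr_cons, ih, List.reverse_reverse]
    rw [find_suffChains, suffChains, List.reverse_cons]

theorem range_nums_alt_eq (l : List Int) :
    range_nums_alt l = (suffChains l).filter (fun c => decide (1 < c.length)) := by
  rw [range_nums_alt]
  simp only [foldr_rev_chains, List.reverse_reverse]

theorem range_nums_eq (l : List Int) :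
    range_nums l = (suffChains l).filter (fun c => decide (1 < c.length)) := by
  rw [range_nums]
  rw [PySem.List.foldl_append_ite (p := fun i => 1 < (innerA l i).2.length) (f := fun i => (innerA l i).2)]
  rw [PySem.List.pyRange_one]
  simp only [Int.sub_zero, Int.toNat_natCast, List.nil_append]
  have hF : ((fun i => (innerA l i).2) ∘ fun k : Nat => 0 + (k : Int))
      = fun k : Nat => chainSpec (l.getD k 0) (l.drop (k + 1)) := by
    funext k; simp [innerA_eq, List.getD_eq_getElem?_getD]
  have hP : ((fun i => decide (1 < (innerA l i).2.length)) ∘ fun k : Nat => 0 + (k : Int))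
      = fun k : Nat => decide (1 < (chainSpec (l.getD k 0) (l.drop (k + 1))).length) := by
    funext k; simp [innerA_eq, List.getD_eq_getElem?_getD]
  rw [List.filter_map, List.map_map, hF, hP, ← map_range_chain l, List.filter_map]
  simp only [Function.comp_def]

-- ===== VERDICT (by name: the statement is the Claim_ definition above) =====
theorem range_nums_spec : Claim_equal_range_nums := by
  intro l _
  show range_nums l = range_nums_alt l
  rw [range_nums_eq, range_nums_alt_eq]
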